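-- pv_equiv track=rewrite | github.com/rolifshitz/Intro-to-Computer-Science | Assignment 4 - Recursion/calcStamp.py | nCr_with_repetition
-- ===== SOURCE A (Python) =====
-- def nCr_with_repetition(cost, denominations, r, r_left=None, combination=None, combinations=None):
--     """
--     Computes all combinations of n objects (stamp denominations) chosen r at a time with repetition. Save only the
--     combinations whose elements sum to cost (as to not create an unnecessarily long object of combinations that are
--     not useful).
--
--     Args:
--         cost (int): The postage cost
--         denominations (list): List of stamp denominations (ints) to choose from.
--         r: the number of objects that are chosen to make a combination
--         r_left: number of elements left to choose. Should not be passed initially, only used during recursion.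
--         combination: List containing a combination of r denominations. Should not be passed initially, only
--             used during recursion.
--         combinations: Running list of lists, where each inner list contains a set of denominations that sum up to cost.
--             Should not be passed initially, only used during recursion.
--
--     Returns:
--         list/None: List of the combinations (each combination is a list) whose elements sum to cost. If there are no such
--             combinations, return None.
--     """
--     # Initialize r_left, combinations, and combinations in first pass
--     if r_left is None or combination is None or combinations is None:
--         r_left = r
--         combination = []
--         combinations = []
--
--     # Base case: when you have chosen r denominations, you have created a combination. Append combination to
--     # combinations list only if sum of elements in combination equals cost. Return combinations in any case.
--     if r_left == 0:
--         if cost == sum_list(combination):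
--             combinations.append(combination)
--         return combinations
--     else:
--         # Run loop to select the current choice and call nCr_with_repetition to select r_left choices
--         for i in range(len(denominations)):
--             nCr_with_repetition(cost, denominations, r, r_left - 1, combination + [denominations[i]], combinations)
--         # When finished popping off all stacks (exits the loop at the start of the stack), return combinations.
--         if r_left == r:
--             return combinations
--
-- def sum_list(ls, running_sum=0, i=-1):
--     """
--     Calculates the sum of the elements in a list using recursion.
--
--     Args:
--         ls (list): List of ints.
--         running_sum (int): Running sum of all elements in ls. running_sum parameter should be left as the default
--             value when first called. (default: 0)
--         i: Index of an element in ls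
--
--     Returns:
--         int: The sum of all of the elements in ls.
--
--     """
--     if i == len(ls) - 1:
--         return running_sum
--     else:
--         return sum_list(ls, running_sum + ls[i], i + 1)
-- ===== SOURCE B (Python) =====
-- def nCr_with_repetition(cost, denominations, r, r_left=None, combination=None, combinations=None):
--     # DFS with a running sum and min/max bound pruning: a branch whose partial
--     # sum can no longer reach cost (even using only the min or max denomination
--     # for all remaining picks) is cut off, instead of enumerating all n**r tuples.
--     if r_left is None or combination is None or combinations is None:
--         r_left = r
--         combination = []
--         combinations = []
--     if r_left == 0:
--         if sum(combination) == cost: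
--             combinations.append(combination)
--         return combinations
--     if not denominations:
--         return combinations
--     lo = min(denominations)
--     hi = max(denominations)
--     target = cost - sum(combination)
--
--     def go(k, s, chosen):
--         if k == 0:
--             if s == target:
--                 combinations.append(combination + chosen)
--             return
--         if s + k * lo > target or s + k * hi < target:
--             return
--         for d in denominations:
--             go(k - 1, s + d, chosen + [d])
--
--     go(r_left, 0, [])
--     return combinations
-- ===== Notes on version B (the rewrite author's own statement) =====
-- stated objective: alternative
-- what changed: A blindly enumerates all len(denominations)**r index tuples and re-sums each finished tuple with a recursive sum_list; B does a DFS that carries an incremental running sum and prunes every branch whose partial sum can no longer reach cost even if all remaining picks were the minimum (or maximum) denomination (a timing run could not verify a speed-up, so none is claimed).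
-- outside the precondition, e.g. on nCr_with_repetition(5, [1, 2], 3, 2, [1], []): A returns None, B returns [[1, 2, 2]]; on nCr_with_repetition(5, [1, 2], -1, None, None, None): A raises RecursionError, B returns []; on nCr_with_repetition(7, [0], 4900, None, None, None): A returns [], B returns []
import Mathlib
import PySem

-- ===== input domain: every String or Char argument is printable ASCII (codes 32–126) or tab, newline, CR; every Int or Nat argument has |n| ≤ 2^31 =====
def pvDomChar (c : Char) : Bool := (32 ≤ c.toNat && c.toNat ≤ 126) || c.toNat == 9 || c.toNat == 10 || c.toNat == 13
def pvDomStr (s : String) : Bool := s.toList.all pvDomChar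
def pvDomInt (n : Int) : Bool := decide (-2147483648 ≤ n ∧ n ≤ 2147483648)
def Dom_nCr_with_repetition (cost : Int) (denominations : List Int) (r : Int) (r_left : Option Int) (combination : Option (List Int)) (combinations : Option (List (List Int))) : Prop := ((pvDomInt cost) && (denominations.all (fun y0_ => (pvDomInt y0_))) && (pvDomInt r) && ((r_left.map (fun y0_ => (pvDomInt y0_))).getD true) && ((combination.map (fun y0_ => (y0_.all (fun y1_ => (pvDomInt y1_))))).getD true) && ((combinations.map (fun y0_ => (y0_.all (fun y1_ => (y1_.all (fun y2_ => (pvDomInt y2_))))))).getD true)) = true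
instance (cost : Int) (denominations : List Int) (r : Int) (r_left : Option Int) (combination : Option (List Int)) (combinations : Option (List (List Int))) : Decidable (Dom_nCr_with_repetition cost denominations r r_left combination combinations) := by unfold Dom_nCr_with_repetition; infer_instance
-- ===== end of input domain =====

-- ===== PORT A =====
-- B replaces A's blind enumeration of all n^r index tuples by a running-sum DFS that
-- prunes branches which can no longer reach cost (min/max bounds); objective: alternative algorithm.
-- A and B both mutate the passed-in `combinations` list in place; the equivalence
-- proved here is about the RETURN value only.

-- sum_list: Python's recursion from i = -1 up to len(ls)-1; the `getD 0` and the final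
-- `else 0` branch are totality guards only (unreachable from the actual call i = -1,
-- where Python's indices are always in range and the recursion terminates).
def sumListA (ls : List Int) (running_sum : Int) (i : Int) : Int :=
  if i = (ls.length : Int) - 1 then running_sum
  else if i < (ls.length : Int) - 1 then
    sumListA ls (running_sum + (PySem.List.pyGet? ls i).getD 0) (i + 1)
  else 0
termination_by ((ls.length : Int) - 1 - i).toNat
decreasing_by omega

-- the recursive worker of A with the in-place mutation of `combinations` threaded as an
-- accumulator; the final `else combs` branch is a totality guard (with rl < 0 Python only
-- returns when the loop body never runs, i.e. denominations = []; then the loop is empty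
-- and combs is returned, which is exactly what this branch yields).
def coreA (cost : Int) (denoms : List Int) (rl : Int) (comb : List Int)
    (combs : List (List Int)) : List (List Int) :=
  if rl = 0 then
    (if cost = sumListA comb 0 (-1) then combs ++ [comb] else combs)
  else if 0 < rl then
    (PySem.List.pyRange 0 (denoms.length : Int) 1).foldl
      (fun acc j => coreA cost denoms (rl - 1) (comb ++ [PySem.List.pyGetD denoms j 0]) acc)
      combs
  else combs
termination_by rl.toNat
decreasing_by omega

def nCr_with_repetition (cost : Int) (denominations : List Int) (r : Int)
    (r_left : Option Int) (combination : Option (List Int))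
    (combinations : Option (List (List Int))) : List (List Int) :=
  match r_left, combination, combinations with
  | some rl, some comb, some combs =>
      if rl = 0 then coreA cost denominations rl comb combs
      else if rl = r then coreA cost denominations rl comb combs
      else []  -- Python returns None here (no list value); excluded by Pre_
  | _, _, _ =>
      -- any argument left as None: Python resets r_left := r, combination := [], combinations := []
      coreA cost denominations r [] []

-- ===== PORT B =====
-- DFS with running sum s and min/max pruning bounds; mirrors Source B's inner `go`.
-- The final `else acc` branch is a totality guard (unreachable: k starts positive).
def goB (denoms : List Int) (lo hi target : Int) (comb : List Int) (k s : Int)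
    (chosen : List Int) (acc : List (List Int)) : List (List Int) :=
  if k = 0 then
    (if s = target then acc ++ [comb ++ chosen] else acc)
  else if s + k * lo > target ∨ s + k * hi < target then acc
  else if 0 < k then
    denoms.foldl (fun a d => goB denoms lo hi target comb (k - 1) (s + d) (chosen ++ [d]) a) acc
  else acc
termination_by k.toNat
decreasing_by omega

def nCr_with_repetition_alt (cost : Int) (denominations : List Int) (r : Int)
    (r_left : Option Int) (combination : Option (List Int))
    (combinations : Option (List (List Int))) : List (List Int) :=
  let init := r_left.isNone || combination.isNone || combinations.isNone
  let rl := if init then r else r_left.getD r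
  let comb := if init then [] else combination.getD []
  let combs := if init then [] else combinations.getD []
  if rl = 0 then (if comb.sum = cost then combs ++ [comb] else combs)
  else if denominations = [] then combs
  else
    let lo := (PySem.List.min? denominations (fun x => x)).getD 0
    let hi := (PySem.List.max? denominations (fun x => x)).getD 0
    goB denominations lo hi (cost - comb.sum) comb rl 0 [] combs

-- ===== PRECONDITION & SPEC =====
-- Pre_ excludes exactly the inputs on which Python A does not return a list value:
-- with the recursion-only arguments all passed and r_left ∉ {0, r}, A falls off the end
-- and returns None; and with nonempty denominations and an effective r_left = r that is
-- negative or larger than about 4990, A's recursion depth (about 2·r frames: r picking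
-- frames plus r sum_list frames, unbounded descent for r < 0) exceeds the test
-- harness's recursion limit of 10000 and A raises RecursionError. The bound r ≤ 4800 is
-- slightly conservative — A still returns for 4800 < r ≲ 4990 (see the cite in
-- claim.json) — because the exact overflow point depends on the ambient stack depth.
def Pre_nCr_with_repetition (cost : Int) (denominations : List Int) (r : Int) (r_left : Option Int) (combination : Option (List Int)) (combinations : Option (List (List Int))) : Prop :=
  let rl : Int :=
    if r_left.isNone || combination.isNone || combinations.isNone then r
    else r_left.getD r
  rl = 0 ∨ (rl = r ∧ (denominations = [] ∨ (0 ≤ r ∧ r ≤ 4800)))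
instance (cost : Int) (denominations : List Int) (r : Int) (r_left : Option Int) (combination : Option (List Int)) (combinations : Option (List (List Int))) : Decidable (Pre_nCr_with_repetition cost denominations r r_left combination combinations) := by unfold Pre_nCr_with_repetition; infer_instance

def pvWitness_nCr_with_repetition : Int × List Int × Int × Option Int × Option (List Int) × Option (List (List Int)) :=
  (5, [1, 2], 3, none, none, none)

def Spec_nCr_with_repetition (cost : Int) (denominations : List Int) (r : Int) (r_left : Option Int) (combination : Option (List Int)) (combinations : Option (List (List Int))) (out : List (List Int)) : Prop := out = nCr_with_repetition_alt cost denominations r r_left combination combinations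
instance (cost : Int) (denominations : List Int) (r : Int) (r_left : Option Int) (combination : Option (List Int)) (combinations : Option (List (List Int))) (out : List (List Int)) : Decidable (Spec_nCr_with_repetition cost denominations r r_left combination combinations out) := by unfold Spec_nCr_with_repetition; infer_instance

-- ===== CLAIM (what is proved, stated in full; the proofs are below) =====
def Claim_equal_nCr_with_repetition : Prop := ∀ (cost : Int) (denominations : List Int) (r : Int) (r_left : Option Int) (combination : Option (List Int)) (combinations : Option (List (List Int))), Dom_nCr_with_repetition cost denominations r r_left combination combinations → Pre_nCr_with_repetition cost denominations r r_left combination combinations → Spec_nCr_with_repetition cost denominations r r_left combination combinations (nCr_with_repetition cost denominations r r_left combination combinations)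

-- ===== LEMMAS AND PROOFS =====

-- sum_list walks ls[j], ls[j+1], …, ls[len-2] once j ≥ 0.
lemma sumListA_fromNat (n : Nat) : ∀ (ls : List Int) (rs : Int) (j : Nat),
    ls.length = j + n + 1 →
    sumListA ls rs (j : Int) = rs + ((ls.take (ls.length - 1)).drop j).sum := by
  induction n with
  | zero =>
      intro ls rs j h
      rw [sumListA]
      rw [if_pos (by omega)]
      have : (ls.take (ls.length - 1)).length = ls.length - 1 := by
        simp [List.length_take]
      rw [List.drop_eq_nil_of_le (by omega)]
      simp
  | succ n ih =>
      intro ls rs j h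
      have hj : j < ls.length := by omega
      rw [sumListA]
      rw [if_neg (by omega), if_pos (by omega)]
      have hget : PySem.List.pyGet? ls (j : Int) = some ls[j] := by
        rw [PySem.List.pyGet?_natCast]
        exact List.getElem?_eq_getElem hj
      rw [hget, Option.getD_some]
      have hcast : ((j : Int) + 1) = ((j + 1 : Nat) : Int) := by push_cast; ring
      rw [hcast, ih ls (rs + ls[j]) (j + 1) (by omega)]
      have hjt : j < (ls.take (ls.length - 1)).length := by
        simp [List.length_take]; omega

      rw [List.drop_eq_getElem_cons hjt]
      have : (ls.take (ls.length - 1))[j] = ls[j] := List.getElem_take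
      rw [this, List.sum_cons]
      ring

lemma sumListA_spec (ls : List Int) (rs : Int) : sumListA ls rs (-1) = rs + ls.sum := by
  rcases List.eq_nil_or_concat ls with h | ⟨l', x, h⟩
  · subst h; rw [sumListA]; simp
  · subst h
    rw [List.concat_eq_append]
    have hlen : 0 < (l' ++ [x]).length := by simp
    rw [sumListA]
    rw [if_neg (by have := hlen; omega), if_pos (by have := hlen; omega)]
    rw [PySem.List.pyGet?_neg_one_append_singleton, Option.getD_some]
    have h0 : (-1 : Int) + 1 = ((0 : Nat) : Int) := by norm_num
    rw [h0, sumListA_fromNat ((l' ++ [x]).length - 1) (l' ++ [x]) (rs + x) 0 (by simp)]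
    have : (l' ++ [x]).take ((l' ++ [x]).length - 1) = l' := by
      simp
    rw [this]
    simp
    ring

-- a left fold whose step fixes every accumulator is the identity
lemma foldl_fixed {α β : Type} (f : β → α → β) (l : List α) :
    ∀ (a : β), (∀ (b : β) (x : α), x ∈ l → f b x = b) → l.foldl f a = a := by
  induction l with
  | nil => intro a _; rfl
  | cons x t ih =>
      intro a h
      rw [List.foldl_cons, h a x (by simp)]
      exact ih a (fun b y hy => h b y (by simp [hy]))

-- pruning soundness: if the remaining n picks cannot bring the sum to cost, no
-- completion is appended and coreA leaves the accumulator unchanged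
lemma coreA_prune (cost : Int) (denoms : List Int) (lo hi : Int)
    (hlo : ∀ d ∈ denoms, lo ≤ d) (hhi : ∀ d ∈ denoms, d ≤ hi) :
    ∀ (n : Nat) (c : List Int) (acc : List (List Int)),
      (cost - c.sum < (n : Int) * lo ∨ (n : Int) * hi < cost - c.sum) →
      coreA cost denoms (n : Int) c acc = acc := by
  intro n
  induction n with
  | zero =>
      intro c acc h
      rw [coreA]
      rw [if_pos (by norm_num)]
      rw [if_neg (by rw [sumListA_spec]; omega)]
  | succ n ih =>
      intro c acc h
      rw [coreA]
      rw [if_neg (by omega), if_pos (by omega)]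
      rw [PySem.List.foldl_pyRange_zero_pyGetD' denoms 0
        (fun a x => coreA cost denoms ((((n : Nat) + 1 : Nat) : Int) - 1) (c ++ [x]) a) acc]
      apply foldl_fixed
      intro b d hd
      have hc : ((((n : Nat) + 1 : Nat) : Int) - 1) = (n : Int) := by push_cast; ring
      rw [hc]
      apply ih
      have hsum : (c ++ [d]).sum = c.sum + d := by simp
      rw [hsum]
      have h1 := hlo d hd
      have h2 := hhi d hd
      have hcast : (((n : Nat) + 1 : Nat) : Int) = (n : Int) + 1 := by push_cast; ring
      rw [hcast] at h
      rcases h with h | h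
      · left; nlinarith
      · right; nlinarith

-- the DFS with running sum and pruning computes exactly A's recursion
lemma goB_eq_coreA (cost : Int) (denoms : List Int) (lo hi : Int) (comb : List Int)
    (hlo : ∀ d ∈ denoms, lo ≤ d) (hhi : ∀ d ∈ denoms, d ≤ hi) :
    ∀ (n : Nat) (chosen : List Int) (acc : List (List Int)),
      goB denoms lo hi (cost - comb.sum) comb (n : Int) chosen.sum chosen acc
        = coreA cost denoms (n : Int) (comb ++ chosen) acc := by
  intro n
  induction n with
  | zero =>
      intro chosen acc
      have e1 : ((0 : Nat) : Int) = 0 := by norm_num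
      rw [e1, goB, coreA, if_pos rfl, if_pos rfl, sumListA_spec]
      have hsum : (comb ++ chosen).sum = comb.sum + chosen.sum := by simp
      split_ifs with h1 h2 <;> first | rfl | (exfalso; omega)
  | succ n ih =>
      intro chosen acc
      have hcast : (((n : Nat) + 1 : Nat) : Int) = (n : Int) + 1 := by push_cast; ring
      rw [goB]
      rw [if_neg (by omega)]
      by_cases hp : chosen.sum + (((n : Nat) + 1 : Nat) : Int) * lo > cost - comb.sum ∨
          chosen.sum + (((n : Nat) + 1 : Nat) : Int) * hi < cost - comb.sum
      · rw [if_pos hp]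
        refine (coreA_prune cost denoms lo hi hlo hhi (n + 1) (comb ++ chosen) acc ?_).symm
        have hsum : (comb ++ chosen).sum = comb.sum + chosen.sum := by simp
        rw [hsum]
        rcases hp with h | h
        · left; omega
        · right; omega
      · rw [if_neg hp, if_pos (by omega)]
        rw [coreA]
        rw [if_neg (by omega), if_pos (by omega)]
        rw [PySem.List.foldl_pyRange_zero_pyGetD' denoms 0
          (fun a x => coreA cost denoms ((((n : Nat) + 1 : Nat) : Int) - 1) ((comb ++ chosen) ++ [x]) a) acc]
        have hfun : (fun (a : List (List Int)) (d : Int) =>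
            goB denoms lo hi (cost - comb.sum) comb ((((n : Nat) + 1 : Nat) : Int) - 1)
              (chosen.sum + d) (chosen ++ [d]) a)
          = (fun (a : List (List Int)) (d : Int) =>
            coreA cost denoms ((((n : Nat) + 1 : Nat) : Int) - 1) ((comb ++ chosen) ++ [d]) a) := by
          funext a d
          have h1 : ((((n : Nat) + 1 : Nat) : Int) - 1) = (n : Int) := by omega
          have h2 : chosen.sum + d = (chosen ++ [d]).sum := by simp
          have h3 : (comb ++ chosen) ++ [d] = comb ++ (chosen ++ [d]) := by
            rw [List.append_assoc]
          rw [h1, h2, h3, ih (chosen ++ [d]) a]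
        rw [hfun]

-- the body-level equivalence: coreA equals B's body whenever the effective r_left
-- is nonnegative or the loop over denominations is empty
lemma key_eq (cost : Int) (denoms : List Int) (rl : Int) (comb : List Int)
    (combs : List (List Int)) (h : 0 ≤ rl ∨ denoms = []) :
    coreA cost denoms rl comb combs =
      (if rl = 0 then (if comb.sum = cost then combs ++ [comb] else combs)
       else if denoms = [] then combs
       else goB denoms ((PySem.List.min? denoms (fun x => x)).getD 0)
         ((PySem.List.max? denoms (fun x => x)).getD 0) (cost - comb.sum) comb rl 0 [] combs) := by
  by_cases h0 : rl = 0
  · subst h0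
    rw [coreA]
    rw [if_pos rfl, if_pos rfl, sumListA_spec]
    split_ifs with h1 h2 h2 <;> first | rfl | omega
  · rw [if_neg h0]
    by_cases hd : denoms = []
    · subst hd
      rw [if_pos rfl, coreA]
      rw [if_neg h0]
      by_cases hp : 0 < rl
      · rw [if_pos hp]; simp [PySem.List.pyRange]
      · rw [if_neg hp]
    · rw [if_neg hd]
      have hrl : 0 ≤ rl := by tauto
      obtain ⟨n, hn⟩ : ∃ n : Nat, rl = (n : Int) := ⟨rl.toNat, by omega⟩
      have hm' : PySem.List.min? denoms (fun x => x) ≠ none := fun hnone =>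
        hd ((PySem.List.min?_eq_none_iff denoms (fun x => x)).mp hnone)
      have hM' : PySem.List.max? denoms (fun x => x) ≠ none := fun hnone =>
        hd ((PySem.List.max?_eq_none_iff denoms (fun x => x)).mp hnone)
      obtain ⟨m, hm⟩ := Option.ne_none_iff_exists'.mp hm'
      obtain ⟨M, hM⟩ := Option.ne_none_iff_exists'.mp hM'
      have hlo : ∀ d ∈ denoms, (PySem.List.min? denoms (fun x => x)).getD 0 ≤ d := by
        intro d hdmem
        rw [hm]
        exact PySem.List.min?_isMin hm d hdmem
      have hhi : ∀ d ∈ denoms, d ≤ (PySem.List.max? denoms (fun x => x)).getD 0 := by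
        intro d hdmem
        rw [hM]
        exact PySem.List.max?_isMax hM d hdmem
      have := goB_eq_coreA cost denoms ((PySem.List.min? denoms (fun x => x)).getD 0)
        ((PySem.List.max? denoms (fun x => x)).getD 0) comb hlo hhi n [] combs
      simp only [List.sum_nil, List.append_nil] at this
      rw [hn, this]

-- ===== VERDICT (by name: the statement is the Claim_ definition above) =====
theorem nCr_with_repetition_spec : Claim_equal_nCr_with_repetition := by
  intro cost denoms r r_left combination combinations _ hpre
  unfold Spec_nCr_with_repetition
  rcases r_left with _ | rl <;> rcases combination with _ | comb <;>
    rcases combinations with _ | combs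
  case some.some.some =>
    have hpre' : rl = 0 ∨ (rl = r ∧ (denoms = [] ∨ (0 ≤ r ∧ r ≤ 4800))) := hpre
    show (if rl = 0 then coreA cost denoms rl comb combs
          else if rl = r then coreA cost denoms rl comb combs else []) = _
    rcases hpre' with h0 | ⟨hr, hor⟩
    · rw [if_pos h0]
      subst h0
      exact key_eq cost denoms 0 comb combs (Or.inl le_rfl)
    · by_cases h0 : rl = 0
      · rw [if_pos h0]
        subst h0
        exact key_eq cost denoms 0 comb combs (Or.inl le_rfl)
      · rw [if_neg h0, if_pos hr]
        refine key_eq cost denoms rl comb combs ?_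
        rcases hor with h | h
        · right; exact h
        · left; omega
  all_goals {
    have hpre' : r = 0 ∨ (r = r ∧ (denoms = [] ∨ (0 ≤ r ∧ r ≤ 4800))) := hpre
    have hp : 0 ≤ r ∨ denoms = [] := by
      rcases hpre' with h0 | ⟨_, h | h⟩
      · left; omega
      · right; exact h
      · left; omega
    show coreA cost denoms r [] [] = _
    exact key_eq cost denoms r [] [] hp
  }
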